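-- pv_equiv track=rewrite | github.com/AladinDervisevic/Project_Euler | euler.py | count_perms
-- ===== SOURCE A (Python) =====
-- def count_perms(pairs):
--     n = 1
--     perms = 1
--     for _, occurrences in pairs:
--         for k in range(1, occurrences + 1):
--             perms *= n
--             perms //= k
--             n += 1
--     return perms
-- ===== SOURCE B (Python) =====
-- def _factorial(n):
--     if n < 0:
--         raise ValueError("factorial() not defined for negative values")
--     f = 1
--     for i in range(2, n + 1):
--         f *= i
--     return f
--
--
-- def count_perms(pairs):
--     total = 0
--     denom = 1
--     for _, occ in pairs:
--         total += occ
--         denom *= _factorial(occ)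
--     return _factorial(total) // denom
-- ===== Notes on version B (the rewrite author's own statement) =====
-- stated objective: simpler
-- what changed: B computes the multinomial coefficient directly as factorial(total) // product of factorial(occ), instead of A's interleaved multiply-then-floor-divide double loop that keeps a running integral product.
-- outside the precondition, e.g. on count_perms([(1, -1)]): A returns 1, B raises ValueError
import Mathlib
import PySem

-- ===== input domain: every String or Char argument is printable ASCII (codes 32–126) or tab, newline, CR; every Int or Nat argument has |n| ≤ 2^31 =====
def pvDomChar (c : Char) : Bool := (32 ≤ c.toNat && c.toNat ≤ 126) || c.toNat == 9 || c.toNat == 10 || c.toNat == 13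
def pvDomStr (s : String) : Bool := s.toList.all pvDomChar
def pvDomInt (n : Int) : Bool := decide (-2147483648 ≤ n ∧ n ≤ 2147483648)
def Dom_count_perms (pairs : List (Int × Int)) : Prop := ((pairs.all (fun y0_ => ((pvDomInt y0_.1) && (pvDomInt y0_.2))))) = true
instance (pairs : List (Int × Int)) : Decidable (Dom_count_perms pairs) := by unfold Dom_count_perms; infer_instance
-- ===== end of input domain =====

-- B computes the multinomial coefficient as factorial(total) // product(factorial(occ)) in one
-- pass plus a single division, instead of A's interleaved multiply-then-floor-divide double loop.


-- ===== PORT A =====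
def count_perms (pairs : List (Int × Int)) : Int :=
  (pairs.foldl
    (fun (st : Int × Int) p =>
      (PySem.List.pyRange 1 (p.2 + 1) 1).foldl
        (fun (st : Int × Int) k => (st.1 + 1, PySem.Int.floordiv (st.2 * st.1) k)) st)
    (1, 1)).2

-- ===== PORT B =====
-- Source B's _factorial; exact for n ≥ 0 (for n < 0 Source B raises ValueError, excluded by Pre_).
def pvFact (n : Int) : Int :=
  (PySem.List.pyRange 2 (n + 1) 1).foldl (fun f i => f * i) 1

def count_perms_alt (pairs : List (Int × Int)) : Int :=
  let st := pairs.foldl (fun (st : Int × Int) p => (st.1 + p.2, st.2 * pvFact p.2)) (0, 1)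
  PySem.Int.floordiv (pvFact st.1) st.2

-- ===== PRECONDITION & SPEC =====
-- Pre_ excludes pairs containing a negative occurrence count, outside the function's natural
-- domain: A silently skips such counts, while B's factorial raises ValueError there.
def Pre_count_perms (pairs : List (Int × Int)) : Prop := ∀ p ∈ pairs, 0 ≤ p.2
instance (pairs : List (Int × Int)) : Decidable (Pre_count_perms pairs) := by
  unfold Pre_count_perms; infer_instance

def pvWitness_count_perms : (List (Int × Int)) := [(1, 2), (2, 1)]

def Spec_count_perms (pairs : List (Int × Int)) (out : Int) : Prop := out = count_perms_alt pairs
instance (pairs : List (Int × Int)) (out : Int) : Decidable (Spec_count_perms pairs out) := by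
  unfold Spec_count_perms; infer_instance

-- ===== CLAIM (what is proved, stated in full; the proofs are below) =====
def Claim_equal_count_perms : Prop := ∀ (pairs : List (Int × Int)), Dom_count_perms pairs → Pre_count_perms pairs → Spec_count_perms pairs (count_perms pairs)

-- ===== LEMMAS AND PROOFS =====

-- pvMulti T cs = ∏ C(T + partial sums, c): the exact value A's running product takes.
def pvMulti : Nat → List Nat → Nat
  | _, [] => 1
  | T, c :: cs => (T + c).choose c * pvMulti (T + c) cs

theorem pvFact_natCast (m : Nat) : pvFact (m : Int) = (Nat.factorial m : Int) := by
  induction m with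
  | zero => decide
  | succ m ih =>
    rcases Nat.eq_zero_or_pos m with h0 | hpos
    · subst h0; decide
    · have h2 : (2:Int) ≤ (m:Int) + 1 := by omega
      have hb : ((m+1 : Nat) : Int) + 1 = ((m:Int) + 1) + 1 := by push_cast; ring
      unfold pvFact at ih ⊢
      rw [hb, PySem.List.pyRange_one_succ_right h2, List.foldl_append, ih]
      simp [Nat.factorial_succ]
      ring

theorem inner_loop (T : Nat) (P : Int) (j : Nat) :
    (PySem.List.pyRange 1 ((j:Int)+1) 1).foldl
      (fun (st : Int × Int) k => (st.1 + 1, PySem.Int.floordiv (st.2 * st.1) k))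
      (((T:Nat):Int) + 1, P)
    = (((T+j : Nat) : Int) + 1, P * ((T+j).choose j : Int)) := by
  induction j with
  | zero =>
    rw [PySem.List.pyRange_one_eq_nil (by omega)]
    simp
  | succ j ih =>
    have hsplit : PySem.List.pyRange 1 ((↑(j+1):Int)+1) 1
        = PySem.List.pyRange 1 ((j:Int)+1) 1 ++ [(j:Int)+1] := by
      have h := PySem.List.pyRange_one_succ_right (a := 1) (b := (j:Int)+1) (by omega)
      push_cast
      exact h
    rw [hsplit, List.foldl_append, ih]
    simp only [List.foldl_cons, List.foldl_nil]
    have hch : ((T+j+1) * ((T+j).choose j) : Nat) = ((T+j+1).choose (j+1)) * (j+1) := by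
      have := Nat.add_one_mul_choose_eq (T+j) j
      omega
    have hchZ : (((T:Int)+j+1) * (((T+j).choose j : Nat) : Int))
        = (((T+j+1).choose (j+1) : Nat) : Int) * ((j:Int)+1) := by
      exact_mod_cast congrArg (Nat.cast (R := Int)) hch
    have hpos : (0:Int) < (j:Int) + 1 := by omega
    have hnum : P * (((T+j).choose j : Nat) : Int) * (((T+j:Nat):Int) + 1)
        = (P * (((T+j+1).choose (j+1) : Nat) : Int)) * ((j:Int)+1) := by
      push_cast at hchZ ⊢
      linear_combination P * hchZ
    rw [hnum, PySem.Int.floordiv_eq_ediv_of_pos hpos, Int.mul_ediv_cancel _ (by omega)]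
    simp only [Prod.mk.injEq]
    refine ⟨by push_cast; omega, by ring_nf⟩

theorem outer_A (ps : List (Int × Int)) (h : ∀ p ∈ ps, 0 ≤ p.2) (T : Nat) (P : Int) :
    ps.foldl
      (fun (st : Int × Int) p =>
        (PySem.List.pyRange 1 (p.2 + 1) 1).foldl
          (fun (st : Int × Int) k => (st.1 + 1, PySem.Int.floordiv (st.2 * st.1) k)) st)
      (((T:Nat):Int) + 1, P)
    = (((T + (ps.map (fun p => p.2.toNat)).sum : Nat) : Int) + 1,
       P * (pvMulti T (ps.map (fun p => p.2.toNat)) : Int)) := by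
  induction ps generalizing T P with
  | nil => simp [pvMulti]
  | cons a ps ih =>
    have ha : (0:Int) ≤ a.2 := h a (by simp)
    have hc : a.2 = ((a.2.toNat : Nat) : Int) := (Int.toNat_of_nonneg ha).symm
    simp only [List.foldl_cons]
    rw [hc, inner_loop T P a.2.toNat,
        ih (fun p hp => h p (by simp [hp])) (T + a.2.toNat)]
    simp only [pvMulti, List.map_cons, List.sum_cons, Prod.mk.injEq]
    refine ⟨by push_cast; ring, by push_cast; ring⟩

theorem outer_B (ps : List (Int × Int)) (h : ∀ p ∈ ps, 0 ≤ p.2) (S : Nat) (D : Int) :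
    ps.foldl (fun (st : Int × Int) p => (st.1 + p.2, st.2 * pvFact p.2)) (((S:Nat):Int), D)
    = (((S + (ps.map (fun p => p.2.toNat)).sum : Nat) : Int),
       D * ((((ps.map (fun p => p.2.toNat)).map Nat.factorial).prod : Nat) : Int)) := by
  induction ps generalizing S D with
  | nil => simp
  | cons a ps ih =>
    have ha : (0:Int) ≤ a.2 := h a (by simp)
    have hc : a.2 = ((a.2.toNat : Nat) : Int) := (Int.toNat_of_nonneg ha).symm
    simp only [List.foldl_cons]
    rw [hc, pvFact_natCast]
    have hS : ((S:Nat):Int) + ((a.2.toNat : Nat) : Int) = (((S + a.2.toNat : Nat)):Int) := by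
      push_cast; ring
    rw [hS, ih (fun p hp => h p (by simp [hp])) (S + a.2.toNat)]
    simp only [List.map_cons, List.sum_cons, List.prod_cons, Prod.mk.injEq]
    refine ⟨by push_cast; ring, by push_cast; ring⟩

theorem multi_fact (T : Nat) (cs : List Nat) :
    pvMulti T cs * (cs.map Nat.factorial).prod * T.factorial = (T + cs.sum).factorial := by
  induction cs generalizing T with
  | nil => simp [pvMulti]
  | cons c cs ih =>
    simp only [pvMulti, List.map_cons, List.prod_cons, List.sum_cons]
    have h1 : (T+c).choose c * c.factorial * T.factorial = (T+c).factorial := by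
      have := Nat.choose_mul_factorial_mul_factorial (Nat.le_add_left c T)
      simpa [Nat.add_sub_cancel] using this
    rw [show T + (c + cs.sum) = (T + c) + cs.sum from by omega, ← ih (T+c), ← h1]
    ring

-- ===== VERDICT (by name: the statement is the Claim_ definition above) =====
theorem count_perms_spec : Claim_equal_count_perms := by
  intro pairs _ hpre
  unfold Spec_count_perms
  simp only [count_perms, count_perms_alt]
  rw [show ((1:Int), (1:Int)) = (((0:Nat):Int) + 1, (1:Int)) from by norm_num,
      outer_A pairs hpre 0 1,
      show ((0:Int), (1:Int)) = (((0:Nat):Int), (1:Int)) from by norm_num,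
      outer_B pairs hpre 0 1]
  simp only [Nat.zero_add, one_mul]
  have hprodpos : 0 < ((pairs.map (fun p : Int × Int => p.2.toNat)).map Nat.factorial).prod := by
    apply List.prod_pos
    intro x hx
    simp only [List.mem_map] at hx
    obtain ⟨c, _, rfl⟩ := hx
    exact Nat.factorial_pos c
  have hpos : (0:Int) < ((((pairs.map (fun p : Int × Int => p.2.toNat)).map Nat.factorial).prod : Nat) : Int) := by
    exact_mod_cast hprodpos
  have hkey : pvMulti 0 (pairs.map (fun p : Int × Int => p.2.toNat))
      * ((pairs.map (fun p : Int × Int => p.2.toNat)).map Nat.factorial).prod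
      = (pairs.map (fun p : Int × Int => p.2.toNat)).sum.factorial := by
    have := multi_fact 0 (pairs.map (fun p : Int × Int => p.2.toNat))
    simpa using this
  have hnum : (((pairs.map (fun p : Int × Int => p.2.toNat)).sum.factorial : Nat) : Int)
      = (pvMulti 0 (pairs.map (fun p : Int × Int => p.2.toNat)) : Int)
        * ((((pairs.map (fun p : Int × Int => p.2.toNat)).map Nat.factorial).prod : Nat) : Int) := by
    exact_mod_cast (congrArg (Nat.cast (R := Int)) hkey).symm
  rw [pvFact_natCast, PySem.Int.floordiv_eq_ediv_of_pos hpos, hnum,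
      Int.mul_ediv_cancel _ (by omega)]
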